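-- pv_equiv track=rewrite | github.com/JinSeoHan/Algorithm | 프로그래머스/2/150369. 택배 배달과 수거하기/택배 배달과 수거하기.py | solution
-- ===== SOURCE A (Python) =====
-- def solution(cap, n, deliveries, pickups):
--     answer = 0
--
--     deliveries = deliveries[::-1]
--     pickups = pickups[::-1]
--
--     deliveryCnt, pickupCnt = 0, 0
--     for i in range(n):
--         deliveryCnt += deliveries[i]
--         pickupCnt += pickups[i]
--
--         while deliveryCnt > 0 or pickupCnt > 0:
--             deliveryCnt -= cap
--             pickupCnt -= cap
--             answer += (n-i)*2
--
--     return answer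
-- ===== SOURCE B (Python) =====
-- def solution(cap, n, deliveries, pickups):
--     answer = 0
--     rd = deliveries[::-1]
--     rp = pickups[::-1]
--     d = p = 0
--     for i in range(n):
--         d += rd[i]
--         p += rp[i]
--         m = d if d > p else p
--         if m > 0:
--             k = -(-m // cap)          # trips needed = ceil(m / cap)
--             answer += k * (n - i) * 2
--             d -= k * cap
--             p -= k * cap
--     return answer
-- ===== Notes on version B (the rewrite author's own statement) =====
-- stated objective: alternative
-- what changed: Replaces the inner while loop that subtracts cap once per trip with a closed-form ceil-division (trips = ceil(max(d,p)/cap)) applied once per house.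
-- outside the precondition, e.g. on solution(0, 1, [0], [0]): A returns 0, B returns 0
import Mathlib
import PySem

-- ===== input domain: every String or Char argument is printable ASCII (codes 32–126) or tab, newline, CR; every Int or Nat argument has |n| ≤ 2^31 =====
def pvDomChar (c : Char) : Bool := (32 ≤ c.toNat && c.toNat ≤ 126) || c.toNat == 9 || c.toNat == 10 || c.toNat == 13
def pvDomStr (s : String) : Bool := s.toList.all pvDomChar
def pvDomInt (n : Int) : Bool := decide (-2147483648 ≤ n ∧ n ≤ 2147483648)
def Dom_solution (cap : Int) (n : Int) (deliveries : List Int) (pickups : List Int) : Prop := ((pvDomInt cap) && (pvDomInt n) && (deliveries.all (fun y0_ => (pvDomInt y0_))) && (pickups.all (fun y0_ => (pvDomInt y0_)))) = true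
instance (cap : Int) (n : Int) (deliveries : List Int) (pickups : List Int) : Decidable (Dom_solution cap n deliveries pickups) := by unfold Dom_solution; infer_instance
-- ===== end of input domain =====

-- B replaces A's inner while loop (one subtraction of cap per trip) by a closed-form
-- ceiling-division count of trips per house (a different algorithm; same measured cost).

-- ===== PORT A =====
-- A's inner 'while deliveryCnt > 0 or pickupCnt > 0' loop; the '0 < cap' conjunct only
-- makes the recursion total (Python diverges there; such inputs are outside Pre_).
def solutionWhileA (cap w : Int) (d p ans : Int) : Int × Int × Int :=
  if h : (0 < d ∨ 0 < p) ∧ 0 < cap then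
    solutionWhileA cap w (d - cap) (p - cap) (ans + w * 2)
  else (d, p, ans)
termination_by (max d p).toNat
decreasing_by
  have h1 : max (d - cap) (p - cap) = max d p - cap := max_sub_sub_right d p cap
  have h2 : 0 < max d p := lt_max_iff.mpr h.1
  omega

-- body of A's 'for i in range(n)' loop (state = (deliveryCnt, pickupCnt, answer))
def solutionStepA (cap n : Int) (ds ps : List Int) (s : Int × Int × Int) (i : Int) : Int × Int × Int :=
  let d := s.1 + PySem.List.pyGetD ds i 0
  let p := s.2.1 + PySem.List.pyGetD ps i 0
  solutionWhileA cap (n - i) d p s.2.2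

def solution (cap : Int) (n : Int) (deliveries : List Int) (pickups : List Int) : Int :=
  let ds := (PySem.List.slice? deliveries none none (-1)).getD []
  let ps := (PySem.List.slice? pickups none none (-1)).getD []
  ((PySem.List.pyRange 0 n 1).foldl (solutionStepA cap n ds ps) (0, 0, 0)).2.2

-- ===== PORT B =====
-- body of B's loop: trips this house = ceil(max(d,p)/cap), done with one floordiv
def solutionStepB (cap n : Int) (ds ps : List Int) (s : Int × Int × Int) (i : Int) : Int × Int × Int :=
  let d := s.1 + PySem.List.pyGetD ds i 0
  let p := s.2.1 + PySem.List.pyGetD ps i 0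
  let m := if d > p then d else p
  if 0 < m then
    let k := -(PySem.Int.floordiv (-m) cap)
    (d - k * cap, p - k * cap, s.2.2 + k * (n - i) * 2)
  else (d, p, s.2.2)

def solution_alt (cap : Int) (n : Int) (deliveries : List Int) (pickups : List Int) : Int :=
  let rd := (PySem.List.slice? deliveries none none (-1)).getD []
  let rp := (PySem.List.slice? pickups none none (-1)).getD []
  ((PySem.List.pyRange 0 n 1).foldl (solutionStepB cap n rd rp) (0, 0, 0)).2.2

-- ===== PRECONDITION & SPEC =====
-- Pre_ requires cap ≥ 1 unless n ≤ 0 (the problem's natural domain: with cap ≤ 0 and a house to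
-- visit A loops forever as soon as any accumulated load is positive, and the degenerate
-- all-nonpositive case where A still returns 0 is excluded with it) and n within both list
-- lengths (A raises IndexError beyond).
def Pre_solution (cap : Int) (n : Int) (deliveries : List Int) (pickups : List Int) : Prop :=
  (1 ≤ cap ∨ n ≤ 0) ∧ n ≤ (deliveries.length : Int) ∧ n ≤ (pickups.length : Int)
instance (cap : Int) (n : Int) (deliveries : List Int) (pickups : List Int) : Decidable (Pre_solution cap n deliveries pickups) := by unfold Pre_solution; infer_instance

def pvWitness_solution : Int × Int × List Int × List Int := (2, 3, [1, 0, 2], [0, 3, 0])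

def Spec_solution (cap : Int) (n : Int) (deliveries : List Int) (pickups : List Int) (out : Int) : Prop := out = solution_alt cap n deliveries pickups
instance (cap : Int) (n : Int) (deliveries : List Int) (pickups : List Int) (out : Int) : Decidable (Spec_solution cap n deliveries pickups out) := by unfold Spec_solution; infer_instance

-- ===== CLAIM (what is proved, stated in full; the proofs are below) =====
def Claim_equal_solution : Prop := ∀ (cap : Int) (n : Int) (deliveries : List Int) (pickups : List Int), Dom_solution cap n deliveries pickups → Pre_solution cap n deliveries pickups → Spec_solution cap n deliveries pickups (solution cap n deliveries pickups)

-- ===== LEMMAS AND PROOFS =====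

-- A's while loop computed in closed form: k = ceil(max(d,p)/cap) iterations happen.
theorem solutionWhileA_closed (cap w : Int) (hcap : 1 ≤ cap) : ∀ (d p ans : Int),
    solutionWhileA cap w d p ans =
      if 0 < max d p then
        (d - (-(PySem.Int.floordiv (-(max d p)) cap)) * cap,
         p - (-(PySem.Int.floordiv (-(max d p)) cap)) * cap,
         ans + (-(PySem.Int.floordiv (-(max d p)) cap)) * (w * 2))
      else (d, p, ans) := by
  intro d p ans
  induction hm : (max d p).toNat using Nat.strong_induction_on generalizing d p ans with
  | _ t IH =>
  by_cases hpos : 0 < max d p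
  · have hcap0 : (0 : Int) < cap := by omega
    set k : Int := -(PySem.Int.floordiv (-(max d p)) cap) with hk
    have hbr : (k - 1) * cap < max d p ∧ max d p ≤ k * cap :=
      (PySem.Int.neg_floordiv_neg_eq_iff_of_pos hcap0).mp hk.symm
    rw [solutionWhileA]
    rw [dif_pos ⟨lt_max_iff.mp hpos, hcap0⟩]
    have hmax' : max (d - cap) (p - cap) = max d p - cap := max_sub_sub_right d p cap
    have hlt : (max (d - cap) (p - cap)).toNat < t := by
      rw [hmax']; omega
    rw [IH _ hlt _ _ _ rfl]
    by_cases h2 : 0 < max (d - cap) (p - cap)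
    · rw [if_pos h2]
      -- k' = k - 1
      have hk' : -(PySem.Int.floordiv (-(max (d - cap) (p - cap))) cap) = k - 1 := by
        rw [hmax']
        refine (PySem.Int.neg_floordiv_neg_eq_iff_of_pos hcap0).mpr ⟨?_, ?_⟩
        · have : (k - 1 - 1) * cap = (k - 1) * cap - cap := by ring
          rw [this]
          have h2' : 0 < max d p - cap := by rw [← hmax']; exact h2
          rcases hbr with ⟨hb1, hb2⟩
          linarith
        · have : (k - 1) * cap = k * cap - cap := by ring
          rw [this]
          rcases hbr with ⟨hb1, hb2⟩
          linarith
      rw [hk', if_pos hpos]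
      simp only [Prod.mk.injEq]
      exact ⟨by ring, by ring, by ring⟩
    · rw [if_neg h2]
      -- last iteration: k = 1
      have hle : max d p - cap ≤ 0 := by rw [← hmax']; omega
      have hk1 : k = 1 := by
        rcases hbr with ⟨hb1, hb2⟩
        nlinarith
      rw [hk1, if_pos hpos]
      simp only [Prod.mk.injEq]
      exact ⟨by ring, by ring, by ring⟩
  · rw [if_neg hpos]
    rw [solutionWhileA]
    rw [dif_neg]
    intro hcontra
    exact hpos (lt_max_iff.mpr hcontra.1)

theorem stepA_eq_stepB (cap n : Int) (ds ps : List Int) (hcap : 1 ≤ cap) :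
    solutionStepA cap n ds ps = solutionStepB cap n ds ps := by
  funext s i
  unfold solutionStepA solutionStepB
  set d := s.1 + PySem.List.pyGetD ds i 0
  set p := s.2.1 + PySem.List.pyGetD ps i 0
  have hm : (if d > p then d else p) = max d p := by
    by_cases h : d > p
    · rw [if_pos h, max_eq_left h.le]
    · rw [if_neg h, max_eq_right (not_lt.mp h)]
  rw [solutionWhileA_closed cap (n - i) hcap d p s.2.2]
  simp only [hm]
  by_cases hpos : 0 < max d p
  · rw [if_pos hpos, if_pos hpos]
    simp only [Prod.mk.injEq, true_and]
    ring
  · rw [if_neg hpos, if_neg hpos]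

-- ===== VERDICT (by name: the statement is the Claim_ definition above) =====
theorem solution_spec : Claim_equal_solution := by
  intro cap n deliveries pickups _hdom hpre
  unfold Spec_solution solution solution_alt
  rcases hpre.1 with hcap | hn
  · simp only [stepA_eq_stepB _ _ _ _ hcap]
  · rw [PySem.List.pyRange_one_eq_nil (by omega : n ≤ 0)]
    simp [List.foldl]
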